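-- pv_equiv track=rewrite | github.com/allaspectsdev/BioForge | src/bioforge/modules/assembly/core/codon/optimizer.py | _count_patterns_avoided
-- ===== SOURCE A (Python) =====
-- def _count_patterns_avoided(
--     seq: str,
--     patterns: list[str],
-- ) -> int:
--     """Count how many patterns from the avoid list are NOT in the sequence."""
--     seq_upper = seq.upper()
--     count = 0
--     for pattern in patterns:
--         if pattern.upper() not in seq_upper:
--             count += 1
--     return count
-- ===== SOURCE B (Python) =====
-- def _count_patterns_avoided(
--     seq: str,
--     patterns: list[str],
-- ) -> int:
--     """Count how many patterns from the avoid list are NOT in the sequence.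
--
--     Instead of scanning the sequence once per pattern, build a hash set of
--     all substrings of the sequence whose lengths occur among the patterns,
--     then answer each pattern by one set lookup.
--     """
--     s = seq.upper()
--     ups = [p.upper() for p in patterns]
--     lengths = set(len(p) for p in ups)
--     found = set()
--     for L in lengths:
--         for i in range(len(s) - L + 1):
--             found.add(s[i:i + L])
--     return sum(1 for p in ups if p not in found)
-- ===== Notes on version B (the rewrite author's own statement) =====
-- stated objective: faster
-- what changed: Replaces the per-pattern substring scan with a substring index: one pass over the sequence per distinct pattern length builds a hash set of all substrings of those lengths, and each pattern is then answered by a single O(1) set lookup instead of an O(N*M) scan.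
import Mathlib
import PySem

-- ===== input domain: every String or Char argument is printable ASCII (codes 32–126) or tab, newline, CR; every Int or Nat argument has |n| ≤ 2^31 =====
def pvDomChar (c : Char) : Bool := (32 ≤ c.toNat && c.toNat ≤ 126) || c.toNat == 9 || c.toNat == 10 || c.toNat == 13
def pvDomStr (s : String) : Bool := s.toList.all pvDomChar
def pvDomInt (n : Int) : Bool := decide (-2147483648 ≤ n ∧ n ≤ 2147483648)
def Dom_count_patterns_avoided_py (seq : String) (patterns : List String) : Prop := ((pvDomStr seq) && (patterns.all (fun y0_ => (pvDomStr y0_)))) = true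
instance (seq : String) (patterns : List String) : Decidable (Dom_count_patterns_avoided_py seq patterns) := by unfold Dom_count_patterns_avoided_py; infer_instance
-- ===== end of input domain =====

-- B replaces A's per-pattern substring scan with a substring index (a set of all
-- substrings of the sequence whose lengths occur among the patterns), answering
-- each pattern by one set lookup; an alternative algorithm, equal on all inputs.

-- ===== PORT A =====
def count_patterns_avoided_py (seq : String) (patterns : List String) : Int :=
  let seq_upper := PySem.Str.upper seq
  patterns.foldl
    (fun count pattern =>
      if PySem.Str.isIn (PySem.Str.upper pattern) seq_upper = false then count + 1 else count)
    0

-- ===== PORT B =====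
def count_patterns_avoided_py_alt (seq : String) (patterns : List String) : Int :=
  let s := PySem.Str.upper seq
  let ups := patterns.map PySem.Str.upper
  let lengths : PySem.Set Int := PySem.Set.ofList (ups.map (fun p => PySem.Str.len p))
  let found : PySem.Set String :=
    lengths.foldl
      (fun acc L =>
        (PySem.List.pyRange 0 (PySem.Str.len s - L + 1) 1).foldl
          (fun acc2 i => PySem.Set.add acc2 (PySem.Str.slice s (some i) (some (i + L)))) acc)
      PySem.Set.empty
  ups.foldl (fun count p => if PySem.Set.contains found p = false then count + 1 else count) 0

-- ===== PRECONDITION & SPEC =====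
def Spec_count_patterns_avoided_py (seq : String) (patterns : List String) (out : Int) : Prop := out = count_patterns_avoided_py_alt seq patterns
instance (seq : String) (patterns : List String) (out : Int) : Decidable (Spec_count_patterns_avoided_py seq patterns out) := by unfold Spec_count_patterns_avoided_py; infer_instance

-- ===== CLAIM (what is proved, stated in full; the proofs are below) =====
def Claim_equal_count_patterns_avoided_py : Prop := ∀ (seq : String) (patterns : List String), Dom_count_patterns_avoided_py seq patterns → Spec_count_patterns_avoided_py seq patterns (count_patterns_avoided_py seq patterns)

-- ===== LEMMAS AND PROOFS =====

-- membership in B's nested build-loop for the substring index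
theorem mem_build (s : String) (Ls : List Int) (acc : PySem.Set String) (x : String) :
    x ∈ Ls.foldl
      (fun acc L =>
        (PySem.List.pyRange 0 (PySem.Str.len s - L + 1) 1).foldl
          (fun acc2 i => PySem.Set.add acc2 (PySem.Str.slice s (some i) (some (i + L)))) acc)
      acc
    ↔ x ∈ acc ∨ ∃ L ∈ Ls, ∃ i ∈ PySem.List.pyRange 0 (PySem.Str.len s - L + 1) 1,
        x = PySem.Str.slice s (some i) (some (i + L)) := by
  induction Ls generalizing acc with
  | nil => simp
  | cons L Ls ih =>
    simp only [List.foldl_cons, ih, PySem.Set.mem_foldl_add, List.mem_cons]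
    constructor
    · rintro ((h | ⟨i, hi, rfl⟩) | ⟨L', hL', i, hi, rfl⟩)
      · exact Or.inl h
      · exact Or.inr ⟨L, Or.inl rfl, i, hi, rfl⟩
      · exact Or.inr ⟨L', Or.inr hL', i, hi, rfl⟩
    · rintro (h | ⟨L', (rfl | hL'), i, hi, rfl⟩)
      · exact Or.inl (Or.inl h)
      · exact Or.inl (Or.inr ⟨i, hi, rfl⟩)
      · exact Or.inr ⟨L', hL', i, hi, rfl⟩

-- an indexed slice of s is an infix of s
theorem slice_infix (s : String) (i L : Int) (hi : 0 ≤ i) (hL : 0 ≤ L) :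
    (PySem.Str.slice s (some i) (some (i + L))).toList <:+: s.toList := by
  rw [PySem.Str.toList_slice, PySem.Chars.slice_eq_listSlice,
    PySem.List.slice_toNat s.toList hi (by omega)]
  exact ((List.take_prefix _ _).isInfix).trans ((List.drop_suffix _ _).isInfix)

-- an infix of s of pattern length is one of the indexed slices of that length
theorem infix_slice (p s : String) (h : p.toList <:+: s.toList) :
    ∃ i ∈ PySem.List.pyRange 0 (PySem.Str.len s - (p.toList.length : Int) + 1) 1,
      p = PySem.Str.slice s (some i) (some (i + (p.toList.length : Int))) := by
  obtain ⟨pre, suf, hps⟩ := h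
  refine ⟨(pre.length : Int), ?_, ?_⟩
  · rw [PySem.List.mem_pyRange_iff_of_pos (by norm_num)]
    refine ⟨by positivity, ?_, one_dvd _⟩
    have hlen := congrArg List.length hps
    simp only [List.length_append] at hlen
    rw [PySem.Str.len_eq]
    omega
  · apply String.toList_injective
    rw [PySem.Str.toList_slice, PySem.Chars.slice_eq_listSlice,
      PySem.List.slice_natCast_add s.toList pre.length p.toList.length, ← hps,
      List.append_assoc, List.drop_left, List.take_left]

-- the decisive fact: membership in the index equals Python's substring test,
-- for any needle whose length was indexed
theorem contains_found_eq (s : String) (Ls : List Int) (q : String)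
    (hq : (q.toList.length : Int) ∈ Ls) (hLs : ∀ L ∈ Ls, 0 ≤ L) :
    PySem.Set.contains
      (Ls.foldl
        (fun acc L =>
          (PySem.List.pyRange 0 (PySem.Str.len s - L + 1) 1).foldl
            (fun acc2 i => PySem.Set.add acc2 (PySem.Str.slice s (some i) (some (i + L)))) acc)
        PySem.Set.empty) q
    = PySem.Str.isIn q s := by
  rcases hIn : PySem.Str.isIn q s with _ | _
  · -- isIn = false: q is not an infix, so no slice can equal q
    rw [← Bool.not_eq_true, PySem.Set.contains_iff, mem_build]
    rintro (h | ⟨L, hL, i, hi, rfl⟩)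
    · simp [PySem.Set.empty] at h
    · have hi0 : 0 ≤ i := by
        rw [PySem.List.mem_pyRange_iff_of_pos (by norm_num)] at hi
        exact hi.1
      have hinf := slice_infix s i L hi0 (hLs L hL)
      rw [PySem.Str.isIn_eq, PySem.Chars.isIn_eq_false_iff] at hIn
      exact hIn hinf
  · -- isIn = true: the slice at the found offset with q's own length is q
    rw [PySem.Set.contains_iff, mem_build]
    have hinf : q.toList <:+: s.toList := by
      rw [PySem.Str.isIn_eq, PySem.Chars.isIn_iff_infix] at hIn
      exact hIn
    obtain ⟨i, hi, hEq⟩ := infix_slice q s hinf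
    exact Or.inr ⟨(q.toList.length : Int), hq, i, hi, hEq⟩

-- ===== VERDICT (by name: the statement is the Claim_ definition above) =====
theorem count_patterns_avoided_py_spec : Claim_equal_count_patterns_avoided_py := by
  intro seq patterns _
  show count_patterns_avoided_py seq patterns = count_patterns_avoided_py_alt seq patterns
  unfold count_patterns_avoided_py count_patterns_avoided_py_alt
  rw [PySem.List.foldl_ite_add_one
        (fun pattern => PySem.Str.isIn (PySem.Str.upper pattern) (PySem.Str.upper seq) = false),
      PySem.List.foldl_ite_add_one (fun p => PySem.Set.contains _ p = false),
      List.countP_map]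
  congr 1
  norm_cast
  apply List.countP_congr
  intro p hp
  simp only [Function.comp_apply, decide_eq_true_eq]
  have key := contains_found_eq (PySem.Str.upper seq)
    ((patterns.map PySem.Str.upper).map (fun p => PySem.Str.len p) |> PySem.Set.ofList)
    (PySem.Str.upper p)
    (by
      rw [PySem.Set.mem_ofList]
      exact List.mem_map.mpr ⟨PySem.Str.upper p, List.mem_map_of_mem hp,
        (PySem.Str.len_eq _).symm⟩)
    (by
      intro L hL
      rw [PySem.Set.mem_ofList] at hL
      obtain ⟨u, _, rfl⟩ := List.mem_map.mp hL
      rw [PySem.Str.len_eq]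
      positivity)
  rw [key]
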